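-- pv_equiv track=rewrite | github.com/ponytaill/HeteroCache | tools/get_cluster.py | find_star_clusters_greedy
-- ===== SOURCE A (Python) =====
-- def find_star_clusters_greedy(adjacency_dict, all_heads_list):
--     """
--     Build star clusters using a greedy strategy.
--     Prioritizes nodes with the highest degree as Pivot (Leader), treating their neighbors as Satellites (Members).
--
--     Returns:
--         cluster_info: {pivot_idx: [satellite_idx, ...]}
--         assigned_nodes: set of nodes successfully assigned as Pivot or Satellite
--     """
--     unassigned = set(all_heads_list)
--     clusters_info = {}
--     assigned_nodes = set()
--
--     while unassigned:
--         candidates = []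
--         for n in unassigned:
--
--             neighbors = adjacency_dict.get(n, set())
--             valid_neighbors = neighbors.intersection(unassigned)
--             degree = len(valid_neighbors)
--             candidates.append((degree, n, valid_neighbors))
--
--         if not candidates:
--             break
--
--
--         candidates.sort(key=lambda x: (-x[0], x[1]))
--
--         best_degree, leader, members_set = candidates[0]
--
--
--         if best_degree == 0:
--             break
--
--         members = sorted(list(members_set))
--         clusters_info[leader] = members
--
--         unassigned.remove(leader)
--         assigned_nodes.add(leader)
--
--         for m in members:
--             unassigned.remove(m)
--             assigned_nodes.add(m)
--
--     return clusters_info, assigned_nodes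
-- ===== SOURCE B (Python) =====
-- def find_star_clusters_greedy(adjacency_dict, all_heads_list):
--     # Lazy bucket-queue re-implementation: degrees are computed once, kept as
--     # counters updated through a reverse-adjacency index when nodes get
--     # assigned, and the leader of each round is read off a bucket queue
--     # (buckets of nodes indexed by degree, scanned downward from a lazily
--     # maintained top pointer; stale bucket entries are filtered on sight).
--     unassigned = set(all_heads_list)
--     clusters_info = {}
--     assigned_nodes = set()
--
--     # one-time O(V+E) setup
--     deg = {}
--     rev = {}
--     buckets = {}
--     for n in unassigned:
--         d = 0
--         for v in adjacency_dict.get(n, set()):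
--             if v in unassigned:
--                 d += 1
--                 rev.setdefault(v, []).append(n)
--         deg[n] = d
--         buckets.setdefault(d, []).append(n)
--     top = max(buckets) if buckets else -1
--
--     while unassigned:
--         leader = None
--         while top >= 0:
--             valid = [n for n in buckets.get(top, ()) if n in unassigned and deg[n] == top]
--             if valid:
--                 buckets[top] = valid
--                 leader = min(valid)
--                 break
--             buckets[top] = []
--             top -= 1
--         if leader is None or top == 0:
--             break
--
--         members = sorted(v for v in adjacency_dict.get(leader, ()) if v in unassigned)
--         clusters_info[leader] = members
--         assigned_nodes.add(leader)
--         assigned_nodes.update(members)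
--         unassigned.discard(leader)
--         unassigned.difference_update(members)
--
--         # only the still-unassigned in-neighbours of removed nodes lose degree
--         for x in [leader] + members:
--             for y in rev.get(x, ()):
--                 if y in unassigned:
--                     deg[y] -= 1
--                     buckets.setdefault(deg[y], []).append(y)
--     return clusters_info, assigned_nodes
-- ===== Notes on version B (the rewrite author's own statement) =====
-- stated objective: faster
-- what changed: A recomputes every unassigned node's neighbour-set intersection and sorts all candidates in every round; B computes degrees once, maintains them as counters updated through a one-time reverse-adjacency index when nodes are assigned, and picks each leader from a lazy bucket queue (nodes bucketed by degree, scanned downward from a top pointer, stale entries filtered on sight) instead of any per-round scan-and-sort.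
-- outside the precondition, e.g. on find_star_clusters_greedy({1: {1, 2}, 2: {1, 3}, 3: {2}}, [1, 2, 3]): A raises KeyError, B returns ({1: [1, 2]}, {1, 2})
import Mathlib
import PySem

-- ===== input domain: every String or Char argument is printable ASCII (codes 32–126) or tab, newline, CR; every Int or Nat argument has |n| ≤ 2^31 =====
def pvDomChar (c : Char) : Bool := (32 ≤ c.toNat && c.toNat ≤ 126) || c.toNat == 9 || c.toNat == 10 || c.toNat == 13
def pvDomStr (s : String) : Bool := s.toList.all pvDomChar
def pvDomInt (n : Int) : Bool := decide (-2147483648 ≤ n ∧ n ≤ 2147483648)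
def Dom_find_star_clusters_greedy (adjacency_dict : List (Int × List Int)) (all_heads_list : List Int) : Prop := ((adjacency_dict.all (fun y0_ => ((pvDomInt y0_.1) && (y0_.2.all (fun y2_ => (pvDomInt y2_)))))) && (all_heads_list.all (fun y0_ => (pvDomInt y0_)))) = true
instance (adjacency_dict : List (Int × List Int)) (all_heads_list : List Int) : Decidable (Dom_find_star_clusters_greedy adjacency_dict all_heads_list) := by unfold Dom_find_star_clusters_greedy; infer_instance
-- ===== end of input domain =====

-- B replaces A's per-round rebuild-all-candidates-and-sort by a one-time setup
-- (degree counters, reverse-adjacency index, degree buckets) with incremental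
-- counter updates on assignment and leader selection from a lazy bucket queue.

-- ===== PORT A =====
-- the dict value is a Python set[int] (PySem.Set.ofList models it)
def pvNb (adjacency_dict : List (Int × List Int)) (n : Int) : PySem.Set Int :=
  PySem.Set.ofList ((PySem.Dict.mk adjacency_dict).getD n [])

-- neighbors.intersection(unassigned)
def pvValidA (adjacency_dict : List (Int × List Int)) (U : PySem.Set Int) (n : Int) : PySem.Set Int :=
  PySem.Set.inter (pvNb adjacency_dict n) U

-- the while-loop of A; fuel = |unassigned| suffices (each round removes the leader).
-- 'unassigned.remove(x)' is ported as Set.discard: under Pre_ (no self-loops) the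
-- removed element is always present, where remove and discard agree.
def pvLoopA (adjacency_dict : List (Int × List Int)) :
    Nat → PySem.Set Int → PySem.Dict Int (List Int) → PySem.Set Int →
    PySem.Dict Int (List Int) × PySem.Set Int
  | 0, _, clusters_info, assigned_nodes => (clusters_info, assigned_nodes)
  | fuel + 1, U, clusters_info, assigned_nodes =>
    if U = [] then (clusters_info, assigned_nodes)
    else
      let candidates := U.map fun n =>
        (((pvValidA adjacency_dict U n).length : Int), n, pvValidA adjacency_dict U n)
      match PySem.List.sorted2 candidates (fun x => -x.1) (fun x => x.2.1) with
      | [] => (clusters_info, assigned_nodes)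
      | (best_degree, leader, members_set) :: _ =>
        if best_degree = 0 then (clusters_info, assigned_nodes)
        else
          let members := PySem.List.sorted members_set (fun x => x)
          let clusters_info' := clusters_info.insert leader members
          let assigned' := members.foldl PySem.Set.add (PySem.Set.add assigned_nodes leader)
          let U' := members.foldl PySem.Set.discard (PySem.Set.discard U leader)
          pvLoopA adjacency_dict fuel U' clusters_info' assigned'

def find_star_clusters_greedy (adjacency_dict : List (Int × List Int)) (all_heads_list : List Int) : (List (Int × List Int)) × List Int :=
  let U := PySem.Set.ofList all_heads_list
  let r := pvLoopA adjacency_dict U.length U PySem.Dict.empty PySem.Set.empty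
  (r.1.items, r.2)

-- ===== PORT B =====
-- one-time setup pass of Source B: degree counters 'deg', reverse-adjacency lists
-- 'rev' and degree buckets (setdefault(..,[]).append(..) = insert of getD ++ [·])
def pvSetupB (adjacency_dict : List (Int × List Int)) (U : PySem.Set Int) :
    PySem.Dict Int Int × PySem.Dict Int (List Int) × PySem.Dict Int (List Int) :=
  U.foldl (fun st n =>
    let dr := (pvNb adjacency_dict n).foldl
      (fun (p : Int × PySem.Dict Int (List Int)) v =>
        if PySem.Set.contains U v then
          (p.1 + 1, p.2.insert v ((p.2.getD v []) ++ [n]))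
        else p) (0, st.2.1)
    (st.1.insert n dr.1, dr.2, st.2.2.insert dr.1 ((st.2.2.getD dr.1 []) ++ [n])))
    (PySem.Dict.empty, PySem.Dict.empty, PySem.Dict.empty)

-- the inner 'while top >= 0' scan of Source B; fuel = (top+1).toNat makes the
-- recursion structural and is exactly the number of iterations Python can do.
-- deg[n] is ported as getD (every bucket entry is an initial head, so the key
-- is always present where Python reads it).
def pvScanB (U : PySem.Set Int) (deg : PySem.Dict Int Int) :
    Nat → Int → PySem.Dict Int (List Int) →
    PySem.Dict Int (List Int) × Int × Option Int
  | 0, top, buckets => (buckets, top, none)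
  | f + 1, top, buckets =>
    let valid := (buckets.getD top []).filter
      (fun n => PySem.Set.contains U n && deg.getD n 0 == top)
    if valid.isEmpty then pvScanB U deg f (top - 1) (buckets.insert top [])
    else (buckets.insert top valid, top, PySem.List.min? valid (fun x => x))

-- the outer while-loop of Source B; fuel = |unassigned| (each round removes the leader)
def pvLoopB (adjacency_dict : List (Int × List Int)) (rev : PySem.Dict Int (List Int)) :
    Nat → PySem.Set Int → PySem.Dict Int Int → PySem.Dict Int (List Int) → Int →
    PySem.Dict Int (List Int) → PySem.Set Int →
    PySem.Dict Int (List Int) × PySem.Set Int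
  | 0, _, _, _, _, ci, an => (ci, an)
  | fuel + 1, U, deg, buckets, top, ci, an =>
    if U = [] then (ci, an)
    else
      let s := pvScanB U deg (top + 1).toNat top buckets
      match s.2.2 with
      | none => (ci, an)
      | some leader =>
        if s.2.1 = 0 then (ci, an)
        else
          let members := PySem.List.sorted
            ((pvNb adjacency_dict leader).filter (fun v => PySem.Set.contains U v))
            (fun x => x)
          let ci' := ci.insert leader members
          let an' := PySem.Set.update (PySem.Set.add an leader) members
          let U' := PySem.Set.diff (PySem.Set.discard U leader) members
          let db := ([leader] ++ members).foldl
            (fun (p : PySem.Dict Int Int × PySem.Dict Int (List Int)) x =>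
              ((rev.getD x []).foldl
                (fun (q : PySem.Dict Int Int × PySem.Dict Int (List Int)) y =>
                  if PySem.Set.contains U' y then
                    (q.1.insert y (q.1.getD y 0 - 1),
                     q.2.insert (q.1.getD y 0 - 1) ((q.2.getD (q.1.getD y 0 - 1) []) ++ [y]))
                  else q) p)) (deg, s.1)
          pvLoopB adjacency_dict rev fuel U' db.1 db.2 s.2.1 ci' an'

def find_star_clusters_greedy_alt (adjacency_dict : List (Int × List Int)) (all_heads_list : List Int) : (List (Int × List Int)) × List Int :=
  let U := PySem.Set.ofList all_heads_list
  let st := pvSetupB adjacency_dict U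
  let top := match PySem.List.max? st.2.2.keys (fun x => x) with
    | none => -1
    | some t => t
  let r := pvLoopB adjacency_dict st.2.1 U.length U st.1 st.2.2 top PySem.Dict.empty PySem.Set.empty
  (r.1.items, r.2)

-- ===== PRECONDITION & SPEC =====
-- Pre_ excludes adjacency dicts with a self-loop on a head node (a node of
-- all_heads_list listed among its own neighbours): when such a node is picked as
-- leader it appears in its own member list and A raises KeyError on the second
-- unassigned.remove of it (a self-looped node absorbed as a member still returns;
-- the exact crash set depends on the rounds and is not closed-form).
def Pre_find_star_clusters_greedy (adjacency_dict : List (Int × List Int)) (all_heads_list : List Int) : Prop :=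
  ∀ p ∈ adjacency_dict, p.1 ∈ all_heads_list → p.1 ∉ p.2
instance (adjacency_dict : List (Int × List Int)) (all_heads_list : List Int) : Decidable (Pre_find_star_clusters_greedy adjacency_dict all_heads_list) := by unfold Pre_find_star_clusters_greedy; infer_instance
def pvWitness_find_star_clusters_greedy : (List (Int × List Int)) × List Int :=
  ([(1, [2, 3]), (2, [1]), (3, [1])], [1, 2, 3])

def Spec_find_star_clusters_greedy (adjacency_dict : List (Int × List Int)) (all_heads_list : List Int) (out : (List (Int × List Int)) × List Int) : Prop := out = find_star_clusters_greedy_alt adjacency_dict all_heads_list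
instance (adjacency_dict : List (Int × List Int)) (all_heads_list : List Int) (out : (List (Int × List Int)) × List Int) : Decidable (Spec_find_star_clusters_greedy adjacency_dict all_heads_list out) := by unfold Spec_find_star_clusters_greedy; infer_instance

-- ===== CLAIM (what is proved, stated in full; the proofs are below) =====
def Claim_equal_find_star_clusters_greedy : Prop := ∀ (adjacency_dict : List (Int × List Int)) (all_heads_list : List Int), Dom_find_star_clusters_greedy adjacency_dict all_heads_list → Pre_find_star_clusters_greedy adjacency_dict all_heads_list → Spec_find_star_clusters_greedy adjacency_dict all_heads_list (find_star_clusters_greedy adjacency_dict all_heads_list)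

-- ===== LEMMAS AND PROOFS =====

-- the current degree of n: |adj(n) ∩ U|, as A computes it
def pvDeg (adjacency_dict : List (Int × List Int)) (U : PySem.Set Int) (n : Int) : Int :=
  ((pvValidA adjacency_dict U n).length : Int)

-- A's candidate triple for n
def pvCand (adjacency_dict : List (Int × List Int)) (U : PySem.Set Int) (n : Int) :
    Int × Int × PySem.Set Int :=
  (pvDeg adjacency_dict U n, n, pvValidA adjacency_dict U n)

-- "r is at least as good as b" under A's sort key (-degree, node)
def pvGe (r b : Int × Int × PySem.Set Int) : Prop :=
  b.1 < r.1 ∨ (r.1 = b.1 ∧ r.2.1 ≤ b.2.1)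

-- head of an insertBy step
def pvStep {α : Type} (before : α → α → Bool) (acc : Option α) (x : α) : Option α :=
  match acc with
  | none => some x
  | some h => if before x h then some x else some h

theorem pv_head?_insertBy {α : Type} (before : α → α → Bool) (x : α) (acc : List α) :
    (PySem.List.insertBy before x acc).head? = pvStep before acc.head? x := by
  cases acc with
  | nil => rfl
  | cons y ys =>
    rw [PySem.List.insertBy]
    by_cases h : before x y <;> simp [pvStep, h]

theorem pv_head?_foldl_insertBy {α : Type} (before : α → α → Bool) (xs : List α) (s : List α) :
    (xs.foldl (fun acc x => PySem.List.insertBy before x acc) s).head? =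
      xs.foldl (pvStep before) s.head? := by
  induction xs generalizing s with
  | nil => rfl
  | cons x xs ih => simp only [List.foldl_cons, ih, pv_head?_insertBy]

theorem pv_deg_eq_countP (adjacency_dict : List (Int × List Int)) (U : PySem.Set Int) (n : Int) :
    pvDeg adjacency_dict U n =
      (((pvNb adjacency_dict n).countP (fun v => PySem.Set.contains U v) : Nat) : Int) := by
  simp [pvDeg, pvValidA, PySem.Set.inter, List.countP_eq_length_filter]

theorem pv_ge_trans {r b c : Int × Int × PySem.Set Int} (h1 : pvGe r b) (h2 : pvGe b c) :
    pvGe r c := by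
  unfold pvGe at *
  omega

theorem pv_before_true {a b : Int × Int × PySem.Set Int}
    (h : (decide (-a.1 < -b.1) || !decide (-b.1 < -a.1) && decide (a.2.1 < b.2.1)) = true) :
    b.1 < a.1 ∨ (a.1 = b.1 ∧ a.2.1 < b.2.1) := by
  simp only [Bool.or_eq_true, Bool.and_eq_true, Bool.not_eq_true', decide_eq_true_iff,
    decide_eq_false_iff_not] at h
  omega

theorem pv_before_false {a b : Int × Int × PySem.Set Int}
    (h : (decide (-a.1 < -b.1) || !decide (-b.1 < -a.1) && decide (a.2.1 < b.2.1)) = false) :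
    pvGe b a := by
  simp only [Bool.or_eq_false_iff, Bool.and_eq_false_iff, Bool.not_eq_false',
    decide_eq_false_iff_not, decide_eq_true_iff] at h
  unfold pvGe
  omega

-- the running head of A's insertion sort is the (max-degree, min-node) element
theorem pv_fold_min (adjacency_dict : List (Int × List Int)) (U : PySem.Set Int) :
    ∀ (L : List Int) (a : Int × Int × PySem.Set Int),
      a = pvCand adjacency_dict U a.2.1 →
      ∃ r, L.foldl (fun acc n => pvStep
          (fun a b : Int × Int × PySem.Set Int =>
            decide (-a.1 < -b.1) || !decide (-b.1 < -a.1) && decide (a.2.1 < b.2.1)) acc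
          (pvCand adjacency_dict U n)) (some a) = some r ∧
        r = pvCand adjacency_dict U r.2.1 ∧ (r.2.1 = a.2.1 ∨ r.2.1 ∈ L) ∧ pvGe r a ∧
        ∀ n ∈ L, pvGe r (pvCand adjacency_dict U n) := by
  intro L
  induction L with
  | nil =>
    intro a ha
    exact ⟨a, rfl, ha, Or.inl rfl, Or.inr ⟨rfl, le_refl _⟩, by simp⟩
  | cons n L ih =>
    intro a ha
    simp only [List.foldl_cons]
    by_cases h : (decide (-(pvCand adjacency_dict U n).1 < -a.1) ||
        !decide (-a.1 < -(pvCand adjacency_dict U n).1) &&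
          decide ((pvCand adjacency_dict U n).2.1 < a.2.1)) = true
    · rw [show pvStep _ (some a) (pvCand adjacency_dict U n) = some (pvCand adjacency_dict U n) by
        simp only [pvStep]; rw [if_pos h]]
      obtain ⟨r, hr, hrc, hrm, hga, hL⟩ := ih (pvCand adjacency_dict U n) rfl
      refine ⟨r, hr, hrc, ?_, ?_, ?_⟩
      · rcases hrm with h1 | h1
        · exact Or.inr (by simp [h1, pvCand])
        · exact Or.inr (List.mem_cons_of_mem _ h1)
      · have := pv_before_true h
        exact pv_ge_trans hga (by unfold pvGe; omega)
      · intro m hm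
        rcases List.mem_cons.mp hm with rfl | hm
        · exact hga
        · exact hL m hm
    · rw [show pvStep _ (some a) (pvCand adjacency_dict U n) = some a by
        simp only [pvStep]; rw [if_neg h]]
      obtain ⟨r, hr, hrc, hrm, hga, hL⟩ := ih a ha
      refine ⟨r, hr, hrc, ?_, hga, ?_⟩
      · rcases hrm with h1 | h1
        · exact Or.inl h1
        · exact Or.inr (List.mem_cons_of_mem _ h1)
      · intro m hm
        rcases List.mem_cons.mp hm with rfl | hm
        · exact pv_ge_trans hga (pv_before_false (Bool.not_eq_true _ ▸ eq_false_of_ne_true h))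
        · exact hL m hm

-- A's head-of-sorted candidate is the (max-degree, min-node) best element
theorem pv_headA (adjacency_dict : List (Int × List Int)) (U : PySem.Set Int) (hne : U ≠ []) :
    ∃ M ℓ, (PySem.List.sorted2
        (U.map fun n => (((pvValidA adjacency_dict U n).length : Int), n, pvValidA adjacency_dict U n))
        (fun x => -x.1) (fun x => x.2.1)).head? = some (M, ℓ, pvValidA adjacency_dict U ℓ) ∧
      ℓ ∈ U ∧ M = pvDeg adjacency_dict U ℓ ∧
      (∀ n ∈ U, pvDeg adjacency_dict U n ≤ M) ∧
      (∀ n ∈ U, pvDeg adjacency_dict U n = M → ℓ ≤ n) := by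
  obtain ⟨u, U', rfl⟩ : ∃ u U', U = u :: U' := by
    cases U with
    | nil => exact absurd rfl hne
    | cons u U' => exact ⟨u, U', rfl⟩
  rw [show (fun n => (((pvValidA adjacency_dict (u :: U') n).length : Int), n,
      pvValidA adjacency_dict (u :: U') n)) = pvCand adjacency_dict (u :: U') from rfl]
  have hkey : (PySem.List.sorted2 ((u :: U').map (pvCand adjacency_dict (u :: U')))
      (fun x => -x.1) (fun x => x.2.1)).head? =
      U'.foldl (fun acc n => pvStep
        (fun a b : Int × Int × PySem.Set Int =>
          decide (-a.1 < -b.1) || !decide (-b.1 < -a.1) && decide (a.2.1 < b.2.1)) acc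
        (pvCand adjacency_dict (u :: U') n)) (some (pvCand adjacency_dict (u :: U') u)) := by
    unfold PySem.List.sorted2
    rw [pv_head?_foldl_insertBy, List.foldl_map]
    rfl
  rw [hkey]
  obtain ⟨r, hr, hrc, hrm, hga, hL⟩ :=
    pv_fold_min adjacency_dict (u :: U') U' (pvCand adjacency_dict (u :: U') u) rfl
  refine ⟨r.1, r.2.1, ?_, ?_, ?_, ?_, ?_⟩
  · rw [hr, show r = (r.1, r.2.1, pvValidA adjacency_dict (u :: U') r.2.1) from by
      have h22 : r.2.2 = pvValidA adjacency_dict (u :: U') r.2.1 :=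
        congrArg (fun p : ℤ × ℤ × PySem.Set ℤ => p.2.2) hrc
      exact Prod.ext rfl (Prod.ext rfl h22)]
  · rcases hrm with h1 | h1
    · rw [h1]; simp [pvCand]
    · exact List.mem_cons_of_mem _ h1
  · exact congrArg Prod.fst hrc
  · intro n hn
    have hge : pvGe r (pvCand adjacency_dict (u :: U') n) := by
      rcases List.mem_cons.mp hn with rfl | hn
      · exact hga
      · exact hL n hn
    unfold pvGe pvCand at hge
    dsimp at hge
    omega
  · intro n hn hdn
    have hge : pvGe r (pvCand adjacency_dict (u :: U') n) := by
      rcases List.mem_cons.mp hn with rfl | hn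
      · exact hga
      · exact hL n hn
    unfold pvGe pvCand at hge
    dsimp at hge
    omega

-- the scan of the bucket queue returns exactly that best element
theorem pv_scan (adjacency_dict : List (Int × List Int)) (U : PySem.Set Int)
    (deg : PySem.Dict Int Int) (M ℓ : Int)
    (hdeg : ∀ n ∈ U, deg.getD n 0 = pvDeg adjacency_dict U n)
    (hℓU : ℓ ∈ U) (hℓdeg : pvDeg adjacency_dict U ℓ = M)
    (hmax : ∀ n ∈ U, pvDeg adjacency_dict U n ≤ M)
    (hmin : ∀ n ∈ U, pvDeg adjacency_dict U n = M → ℓ ≤ n) :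
    ∀ (f : Nat) (t : Int) (bk : PySem.Dict Int (List Int)),
      (hbk : ∀ n ∈ U, n ∈ bk.getD (pvDeg adjacency_dict U n) []) →
      f = (t + 1).toNat → M ≤ t →
      ∃ bk', pvScanB U deg f t bk = (bk', M, some ℓ) ∧
        ∀ n ∈ U, n ∈ bk'.getD (pvDeg adjacency_dict U n) [] := by
  have hM0 : (0 : ℤ) ≤ M := by
    rw [← hℓdeg]; exact Int.natCast_nonneg _
  intro f
  induction f with
  | zero =>
    intro t bk hbk hf ht
    exfalso
    omega
  | succ f ih =>
    intro t bk hbk hf ht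
    rw [pvScanB]
    by_cases hMt : t = M
    · subst hMt
      have hv : ℓ ∈ (bk.getD t []).filter
          (fun n => PySem.Set.contains U n && deg.getD n 0 == t) := by
        rw [List.mem_filter]
        refine ⟨?_, ?_⟩
        · have := hbk ℓ hℓU
          rwa [hℓdeg] at this
        · simp [hdeg ℓ hℓU, hℓdeg, hℓU]
      have hvm : ∀ m ∈ (bk.getD t []).filter
          (fun n => PySem.Set.contains U n && deg.getD n 0 == t),
          m ∈ U ∧ pvDeg adjacency_dict U m = t := by
        intro m hm
        rw [List.mem_filter] at hm
        obtain ⟨-, hm2⟩ := hm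
        simp only [Bool.and_eq_true, beq_iff_eq] at hm2
        have hmU : m ∈ U := (PySem.Set.contains_iff _ _).mp hm2.1
        exact ⟨hmU, by rw [← hdeg m hmU]; exact hm2.2⟩
      rw [if_neg (by
        simp only [List.isEmpty_iff]
        intro hnil
        rw [hnil] at hv
        exact List.not_mem_nil hv)]
      have hmin? : PySem.List.min? ((bk.getD t []).filter
          (fun n => PySem.Set.contains U n && deg.getD n 0 == t)) (fun x => x) = some ℓ := by
        cases hmq : PySem.List.min? ((bk.getD t []).filter
            (fun n => PySem.Set.contains U n && deg.getD n 0 == t)) (fun x => x) with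
        | none =>
          rw [PySem.List.min?_eq_none_iff] at hmq
          rw [hmq] at hv
          exact absurd hv (List.not_mem_nil)
        | some m =>
          have hmem := PySem.List.min?_mem hmq
          obtain ⟨hmU, hmdeg⟩ := hvm m hmem
          have h1 : ℓ ≤ m := hmin m hmU hmdeg
          have h2 : m ≤ ℓ := PySem.List.min?_isMin hmq ℓ hv
          rw [le_antisymm h2 h1]
      refine ⟨bk.insert t ((bk.getD t []).filter
          (fun n => PySem.Set.contains U n && deg.getD n 0 == t)), ?_, ?_⟩
      · rw [hmin?]
      · intro n hn
        by_cases hd : pvDeg adjacency_dict U n = t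
        · rw [hd, PySem.Dict.getD_insert_self, List.mem_filter]
          refine ⟨by rw [← hd]; exact hbk n hn, ?_⟩
          simp [hdeg n hn, hd, hn]
        · rw [PySem.Dict.getD_insert_of_ne _ _ _ hd]
          exact hbk n hn
    · have hlt : M < t := lt_of_le_of_ne ht (fun h => hMt h.symm)
      have hnil : (bk.getD t []).filter
          (fun n => PySem.Set.contains U n && deg.getD n 0 == t) = [] := by
        rw [List.eq_nil_iff_forall_not_mem]
        intro m hm
        rw [List.mem_filter] at hm
        obtain ⟨-, hm2⟩ := hm
        simp only [Bool.and_eq_true, beq_iff_eq] at hm2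
        have hmU : m ∈ U := (PySem.Set.contains_iff _ _).mp hm2.1
        have := hmax m hmU
        rw [← hdeg m hmU] at this
        omega
      rw [if_pos (by rw [hnil]; rfl)]
      refine ih (t - 1) (bk.insert t []) ?_ (by omega) (by omega)
      intro n hn
      rw [PySem.Dict.getD_insert_of_ne _ _ _ (by have := hmax n hn; omega)]
      exact hbk n hn

theorem pv_foldl_discard_eq_diff (ms : List Int) (s : PySem.Set Int) :
    ms.foldl PySem.Set.discard s = PySem.Set.diff s ms := by
  induction ms generalizing s with
  | nil => simp [PySem.Set.diff]
  | cons m ms ih =>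
    simp only [List.foldl_cons, ih, PySem.Set.diff, PySem.Set.discard, List.filter_filter]
    apply List.filter_congr
    intro x _
    by_cases hx : x = m <;> by_cases hms : x ∈ ms <;> simp [hx, hms]

-- rev's correctness: rev[x] lists each head y with x among y's (deduplicated)
-- neighbours and x itself a head, exactly once
def pvRevP (adjacency_dict : List (Int × List Int)) (U0 : PySem.Set Int)
    (rev : PySem.Dict Int (List Int)) : Prop :=
  ∀ x y : Int, (rev.getD x []).count y =
    if y ∈ U0 ∧ x ∈ pvNb adjacency_dict y ∧ x ∈ U0 then 1 else 0

theorem pv_count_append_singleton (y n : Int) (l : List Int) :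
    (l ++ [n]).count y = l.count y + (if y = n then 1 else 0) := by
  rw [List.count_append]
  congr 1
  by_cases hy : y = n
  · subst hy; simp
  · simp [hy, Ne.symm hy]

-- the inner neighbour loop of the setup pass: counts the degree and appends n
-- once to rev[v] for each distinct neighbour v of n that is a head
theorem pv_setup_inner (U0 : PySem.Set Int) (n : Int) :
    ∀ (l : List Int), l.Nodup → ∀ (d0 : Int) (rc : PySem.Dict Int (List Int)),
      (l.foldl (fun (p : Int × PySem.Dict Int (List Int)) v =>
          if PySem.Set.contains U0 v then
            (p.1 + 1, p.2.insert v ((p.2.getD v []) ++ [n]))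
          else p) (d0, rc)).1 =
        d0 + ((l.countP (fun v => PySem.Set.contains U0 v) : Nat) : Int) ∧
      ∀ x y : Int, ((l.foldl (fun (p : Int × PySem.Dict Int (List Int)) v =>
          if PySem.Set.contains U0 v then
            (p.1 + 1, p.2.insert v ((p.2.getD v []) ++ [n]))
          else p) (d0, rc)).2.getD x []).count y =
        (rc.getD x []).count y + (if y = n ∧ x ∈ l ∧ x ∈ U0 then 1 else 0) := by
  intro l
  induction l with
  | nil => intro _ d0 rc; exact ⟨by simp, by intro x y; simp⟩
  | cons v l ih =>
    intro hnd d0 rc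
    have hvl : v ∉ l := (List.nodup_cons.mp hnd).1
    have hl : l.Nodup := (List.nodup_cons.mp hnd).2
    simp only [List.foldl_cons]
    by_cases hv : PySem.Set.contains U0 v = true
    · rw [if_pos hv]
      have hvU : v ∈ U0 := (PySem.Set.contains_iff _ _).mp hv
      obtain ⟨ih1, ih2⟩ := ih hl (d0 + 1) (rc.insert v ((rc.getD v []) ++ [n]))
      constructor
      · rw [ih1, List.countP_cons_of_pos hv]
        push_cast
        ring
      · intro x y
        rw [ih2 x y]
        by_cases hx : x = v
        · subst hx
          rw [PySem.Dict.getD_insert_self, pv_count_append_singleton]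
          have hnotl : ¬(y = n ∧ x ∈ l ∧ x ∈ U0) := fun h => hvl h.2.1
          rw [if_neg hnotl]
          by_cases hy : y = n <;> simp [hy, hvU]
        · rw [PySem.Dict.getD_insert_of_ne _ _ _ hx]
          congr 1
          simp [List.mem_cons, hx]
    · rw [if_neg hv]
      have hvU : v ∉ U0 := fun hm => hv ((PySem.Set.contains_iff _ _).mpr hm)
      obtain ⟨ih1, ih2⟩ := ih hl d0 rc
      constructor
      · rw [ih1, List.countP_cons_of_neg (by simpa using hv)]
      · intro x y
        rw [ih2 x y]
        congr 1
        by_cases hx : x = v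
        · subst hx
          simp [hvU]
        · simp [List.mem_cons, hx]

-- the setup fold, processed suffix by suffix
theorem pv_setup_go (adjacency_dict : List (Int × List Int)) (U0 : PySem.Set Int)
    (hnd0 : U0.Nodup) :
    ∀ (S P : List Int), U0 = P ++ S →
    ∀ (dg : PySem.Dict Int Int) (rv bk : PySem.Dict Int (List Int)),
      (∀ m ∈ P, dg.getD m 0 = pvDeg adjacency_dict U0 m) →
      (∀ x y : Int, ((rv.getD x []).count y) =
        if y ∈ P ∧ x ∈ pvNb adjacency_dict y ∧ x ∈ U0 then 1 else 0) →
      (∀ m ∈ P, m ∈ bk.getD (pvDeg adjacency_dict U0 m) []) →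
      (∀ m ∈ U0, (S.foldl (fun st n =>
          let dr := (pvNb adjacency_dict n).foldl
            (fun (p : Int × PySem.Dict Int (List Int)) v =>
              if PySem.Set.contains U0 v then
                (p.1 + 1, p.2.insert v ((p.2.getD v []) ++ [n]))
              else p) (0, st.2.1)
          (st.1.insert n dr.1, dr.2, st.2.2.insert dr.1 ((st.2.2.getD dr.1 []) ++ [n])))
          (dg, rv, bk)).1.getD m 0 = pvDeg adjacency_dict U0 m) ∧
      (∀ x y : Int, (((S.foldl (fun st n =>
          let dr := (pvNb adjacency_dict n).foldl
            (fun (p : Int × PySem.Dict Int (List Int)) v =>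
              if PySem.Set.contains U0 v then
                (p.1 + 1, p.2.insert v ((p.2.getD v []) ++ [n]))
              else p) (0, st.2.1)
          (st.1.insert n dr.1, dr.2, st.2.2.insert dr.1 ((st.2.2.getD dr.1 []) ++ [n])))
          (dg, rv, bk)).2.1.getD x []).count y) =
        if y ∈ U0 ∧ x ∈ pvNb adjacency_dict y ∧ x ∈ U0 then 1 else 0) ∧
      (∀ m ∈ U0, m ∈ (S.foldl (fun st n =>
          let dr := (pvNb adjacency_dict n).foldl
            (fun (p : Int × PySem.Dict Int (List Int)) v =>
              if PySem.Set.contains U0 v then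
                (p.1 + 1, p.2.insert v ((p.2.getD v []) ++ [n]))
              else p) (0, st.2.1)
          (st.1.insert n dr.1, dr.2, st.2.2.insert dr.1 ((st.2.2.getD dr.1 []) ++ [n])))
          (dg, rv, bk)).2.2.getD (pvDeg adjacency_dict U0 m) []) := by
  intro S
  induction S with
  | nil =>
    intro P hsplit dg rv bk h1 h2 h3
    rw [List.append_nil] at hsplit
    subst hsplit
    exact ⟨h1, h2, h3⟩
  | cons n S ih =>
    intro P hsplit dg rv bk h1 h2 h3
    have hnP : n ∉ P := by
      intro hn
      exact (List.disjoint_of_nodup_append (hsplit ▸ hnd0)) hn List.mem_cons_self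
    have hnU0 : n ∈ U0 := by rw [hsplit]; exact List.mem_append_right _ List.mem_cons_self
    obtain ⟨hi1, hi2⟩ := pv_setup_inner U0 n (pvNb adjacency_dict n)
      (PySem.Set.nodup_ofList _) 0 rv
    rw [zero_add, ← pv_deg_eq_countP] at hi1
    simp only [List.foldl_cons]
    refine ih (P ++ [n]) (by rw [hsplit, List.append_assoc]; rfl) _ _ _ ?_ ?_ ?_
    · intro m hm
      rw [hi1]
      rcases List.mem_append.mp hm with hm | hm
      · rw [PySem.Dict.getD_insert_of_ne _ _ _ (fun he => hnP (by rw [← he]; exact hm))]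
        exact h1 m hm
      · rw [List.mem_singleton.mp hm, PySem.Dict.getD_insert_self]
    · intro x y
      rw [hi2 x y, h2 x y]
      by_cases hy : y = n
      · subst hy
        have : (y ∈ P) = False := by simp [hnP]
        simp only [List.mem_append, List.mem_singleton, this]
        by_cases hc : x ∈ pvNb adjacency_dict y ∧ x ∈ U0 <;> simp [hc]
      · simp [List.mem_append, hy]
    · intro m hm
      rw [hi1, PySem.Dict.getD_insert]
      split_ifs with hdm
      · rcases List.mem_append.mp hm with hm' | hm'
        · exact List.mem_append_left _ (hdm ▸ h3 m hm')
        · rw [List.mem_singleton.mp hm']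
          exact List.mem_append_right _ (by simp)
      · rcases List.mem_append.mp hm with hm' | hm'
        · exact h3 m hm'
        · exact absurd (by rw [List.mem_singleton.mp hm']) hdm

-- what the setup pass establishes
theorem pv_setup (adjacency_dict : List (Int × List Int)) (U0 : PySem.Set Int)
    (hnd : U0.Nodup) :
    (∀ n ∈ U0, (pvSetupB adjacency_dict U0).1.getD n 0 = pvDeg adjacency_dict U0 n) ∧
    pvRevP adjacency_dict U0 (pvSetupB adjacency_dict U0).2.1 ∧
    (∀ n ∈ U0, n ∈ (pvSetupB adjacency_dict U0).2.2.getD (pvDeg adjacency_dict U0 n) []) := by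
  have h := pv_setup_go adjacency_dict U0 hnd U0 [] rfl
    PySem.Dict.empty PySem.Dict.empty PySem.Dict.empty
    (by intro m hm; exact absurd hm (List.not_mem_nil))
    (by intro x y; simp [PySem.Dict.getD_empty])
    (by intro m hm; exact absurd hm (List.not_mem_nil))
  exact ⟨h.1, h.2.1, h.2.2⟩

-- one pass of decrements: every occurrence of a still-unassigned y in the
-- processed list lowers deg[y] by one and re-buckets y at its new degree
theorem pv_dec_fold (U' : PySem.Set Int) :
    ∀ (L : List Int) (dgc : PySem.Dict Int Int) (bkc : PySem.Dict Int (List Int)),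
      (∀ y ∈ U', y ∈ bkc.getD (dgc.getD y 0) []) →
      (∀ y ∈ U', (L.foldl
          (fun (q : PySem.Dict Int Int × PySem.Dict Int (List Int)) y =>
            if PySem.Set.contains U' y then
              (q.1.insert y (q.1.getD y 0 - 1),
               q.2.insert (q.1.getD y 0 - 1) ((q.2.getD (q.1.getD y 0 - 1) []) ++ [y]))
            else q) (dgc, bkc)).1.getD y 0 = dgc.getD y 0 - (L.count y : Int)) ∧
      (∀ y ∈ U', y ∈ (L.foldl
          (fun (q : PySem.Dict Int Int × PySem.Dict Int (List Int)) y =>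
            if PySem.Set.contains U' y then
              (q.1.insert y (q.1.getD y 0 - 1),
               q.2.insert (q.1.getD y 0 - 1) ((q.2.getD (q.1.getD y 0 - 1) []) ++ [y]))
            else q) (dgc, bkc)).2.getD ((L.foldl
          (fun (q : PySem.Dict Int Int × PySem.Dict Int (List Int)) y =>
            if PySem.Set.contains U' y then
              (q.1.insert y (q.1.getD y 0 - 1),
               q.2.insert (q.1.getD y 0 - 1) ((q.2.getD (q.1.getD y 0 - 1) []) ++ [y]))
            else q) (dgc, bkc)).1.getD y 0) []) := by
  intro L
  induction L with
  | nil =>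
    intro dgc bkc hbkc
    exact ⟨by intro y hy; simp, hbkc⟩
  | cons z L ih =>
    intro dgc bkc hbkc
    simp only [List.foldl_cons]
    by_cases hz : PySem.Set.contains U' z = true
    · rw [if_pos hz]
      have hzU' : z ∈ U' := (PySem.Set.contains_iff _ _).mp hz
      have hbkc' : ∀ y ∈ U',
          y ∈ (bkc.insert (dgc.getD z 0 - 1) ((bkc.getD (dgc.getD z 0 - 1) []) ++ [z])).getD
            ((dgc.insert z (dgc.getD z 0 - 1)).getD y 0) [] := by
        intro y hy
        by_cases hyz : y = z
        · subst hyz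
          rw [PySem.Dict.getD_insert_self, PySem.Dict.getD_insert_self]
          exact List.mem_append_right _ (by simp)
        · rw [PySem.Dict.getD_insert_of_ne _ _ _ hyz, PySem.Dict.getD_insert]
          split_ifs with hk
          · exact List.mem_append_left _ (hk ▸ hbkc y hy)
          · exact hbkc y hy
      obtain ⟨ih1, ih2⟩ := ih (dgc.insert z (dgc.getD z 0 - 1))
        (bkc.insert (dgc.getD z 0 - 1) ((bkc.getD (dgc.getD z 0 - 1) []) ++ [z])) hbkc'
      refine ⟨?_, ih2⟩
      intro y hy
      rw [ih1 y hy]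
      by_cases hyz : y = z
      · subst hyz
        rw [PySem.Dict.getD_insert_self, List.count_cons_self]
        push_cast
        ring
      · rw [PySem.Dict.getD_insert_of_ne _ _ _ hyz,
          List.count_cons_of_ne (Ne.symm hyz)]
    · rw [if_neg hz]
      obtain ⟨ih1, ih2⟩ := ih dgc bkc hbkc
      refine ⟨?_, ih2⟩
      intro y hy
      have hyz : y ≠ z := fun h => hz (h ▸ ((PySem.Set.contains_iff _ _).mpr hy))
      rw [ih1 y hy, List.count_cons_of_ne (Ne.symm hyz)]

-- a loop over R of inner loops over rev[x] is one loop over the concatenation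
theorem pv_foldl_flatMap (rev : PySem.Dict Int (List Int)) (U' : PySem.Set Int) :
    ∀ (R : List Int) (i : PySem.Dict Int Int × PySem.Dict Int (List Int)),
      R.foldl (fun (p : PySem.Dict Int Int × PySem.Dict Int (List Int)) x =>
        ((rev.getD x []).foldl
          (fun (q : PySem.Dict Int Int × PySem.Dict Int (List Int)) y =>
            if PySem.Set.contains U' y then
              (q.1.insert y (q.1.getD y 0 - 1),
               q.2.insert (q.1.getD y 0 - 1) ((q.2.getD (q.1.getD y 0 - 1) []) ++ [y]))
            else q) p)) i =
      (R.flatMap (fun x => rev.getD x [])).foldl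
        (fun (q : PySem.Dict Int Int × PySem.Dict Int (List Int)) y =>
          if PySem.Set.contains U' y then
            (q.1.insert y (q.1.getD y 0 - 1),
             q.2.insert (q.1.getD y 0 - 1) ((q.2.getD (q.1.getD y 0 - 1) []) ++ [y]))
          else q) i := by
  intro R
  induction R with
  | nil => intro i; rfl
  | cons a R ihR => intro i; rw [List.foldl_cons, ihR, List.flatMap_cons, List.foldl_append]

-- counting an element across two duplicate-free lists is symmetric
theorem pv_countP_cons_mem (a : Int) (l' : List Int) (hal : a ∉ l') :
    ∀ (R : List Int), R.Nodup →
      R.countP (fun v => decide (v ∈ a :: l')) =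
      R.countP (fun v => decide (v ∈ l')) + (if a ∈ R then 1 else 0) := by
  intro R
  induction R with
  | nil => simp
  | cons r R ihR =>
    intro hnd
    have hrR : r ∉ R := (List.nodup_cons.mp hnd).1
    have hR : R.Nodup := (List.nodup_cons.mp hnd).2
    rw [List.countP_cons, List.countP_cons, ihR hR]
    by_cases hra : r = a
    · subst hra
      have h1 : (r ∈ r :: l') = True := by simp
      have h2 : (r ∈ l') = False := by simp [hal]
      have h3 : (r ∈ r :: R) = True := by simp
      have h4 : (r ∈ R) = False := by simp [hrR]
      simp only [h1, h2, h3, h4, decide_true, decide_false]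
      simp
    · have h1 : (r ∈ a :: l') = (r ∈ l') := by simp [List.mem_cons, hra]
      have h2 : (a ∈ r :: R) = (a ∈ R) := by simp [List.mem_cons, Ne.symm hra]
      simp only [h1, h2]
      split_ifs <;> omega

theorem pv_countP_comm : ∀ (l R : List Int), l.Nodup → R.Nodup →
    l.countP (fun v => decide (v ∈ R)) = R.countP (fun v => decide (v ∈ l)) := by
  intro l
  induction l with
  | nil => intro R _ _; simp
  | cons a l ihl =>
    intro R hnd hndR
    have hal : a ∉ l := (List.nodup_cons.mp hnd).1
    have hl : l.Nodup := (List.nodup_cons.mp hnd).2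
    rw [List.countP_cons, ihl R hl hndR, pv_countP_cons_mem a l hal R hndR]
    simp

-- the decrement loop turns degrees w.r.t. U into degrees w.r.t. U' = U \ R and
-- keeps every still-unassigned node in the bucket of its current degree
theorem pv_decrement (adjacency_dict : List (Int × List Int)) (U0 : PySem.Set Int)
    (rev : PySem.Dict Int (List Int)) (hrev : pvRevP adjacency_dict U0 rev)
    (U U' : PySem.Set Int) (R : List Int)
    (hRU : ∀ x ∈ R, x ∈ U) (hUU0 : ∀ x ∈ U, x ∈ U0) (hRnd : R.Nodup)
    (hU' : ∀ y, y ∈ U' ↔ (y ∈ U ∧ y ∉ R))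
    (deg : PySem.Dict Int Int) (bk : PySem.Dict Int (List Int))
    (hdeg : ∀ y ∈ U, deg.getD y 0 = pvDeg adjacency_dict U y)
    (hbk : ∀ y ∈ U', y ∈ bk.getD (deg.getD y 0) []) :
    (∀ y ∈ U', (R.foldl
        (fun (p : PySem.Dict Int Int × PySem.Dict Int (List Int)) x =>
          ((rev.getD x []).foldl
            (fun (q : PySem.Dict Int Int × PySem.Dict Int (List Int)) y =>
              if PySem.Set.contains U' y then
                (q.1.insert y (q.1.getD y 0 - 1),
                 q.2.insert (q.1.getD y 0 - 1) ((q.2.getD (q.1.getD y 0 - 1) []) ++ [y]))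
              else q) p)) (deg, bk)).1.getD y 0 = pvDeg adjacency_dict U' y) ∧
    (∀ y ∈ U', y ∈ (R.foldl
        (fun (p : PySem.Dict Int Int × PySem.Dict Int (List Int)) x =>
          ((rev.getD x []).foldl
            (fun (q : PySem.Dict Int Int × PySem.Dict Int (List Int)) y =>
              if PySem.Set.contains U' y then
                (q.1.insert y (q.1.getD y 0 - 1),
                 q.2.insert (q.1.getD y 0 - 1) ((q.2.getD (q.1.getD y 0 - 1) []) ++ [y]))
              else q) p)) (deg, bk)).2.getD ((R.foldl
        (fun (p : PySem.Dict Int Int × PySem.Dict Int (List Int)) x =>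
          ((rev.getD x []).foldl
            (fun (q : PySem.Dict Int Int × PySem.Dict Int (List Int)) y =>
              if PySem.Set.contains U' y then
                (q.1.insert y (q.1.getD y 0 - 1),
                 q.2.insert (q.1.getD y 0 - 1) ((q.2.getD (q.1.getD y 0 - 1) []) ++ [y]))
              else q) p)) (deg, bk)).1.getD y 0) []) := by
  have hflat := pv_foldl_flatMap rev U' R
  have hdecfold := pv_dec_fold U' (R.flatMap (fun x => rev.getD x [])) deg bk hbk
  have hcount : ∀ (R' : List Int), (∀ x ∈ R', x ∈ U0) → ∀ y, y ∈ U0 →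
      ((R'.flatMap (fun x => rev.getD x [])).count y) =
      R'.countP (fun x => decide (x ∈ pvNb adjacency_dict y)) := by
    intro R'
    induction R' with
    | nil => intro _ y _; rfl
    | cons x R' ihR =>
      intro hR'U0 y hyU0
      rw [List.flatMap_cons, List.count_append, List.countP_cons,
        ihR (fun a ha => hR'U0 a (List.mem_cons_of_mem _ ha)) y hyU0, hrev x y]
      have hxU0 : x ∈ U0 := hR'U0 x List.mem_cons_self
      by_cases hnb : x ∈ pvNb adjacency_dict y
      · simp [hyU0, hxU0, hnb]
        omega
      · simp [hnb]
  have hdegsplit : ∀ y ∈ U', pvDeg adjacency_dict U y =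
      pvDeg adjacency_dict U' y + ((R.countP (fun x => decide (x ∈ pvNb adjacency_dict y)) : Nat) : Int) := by
    intro y hy
    rw [pv_deg_eq_countP, pv_deg_eq_countP,
      ← pv_countP_comm (pvNb adjacency_dict y) R (PySem.Set.nodup_ofList _) hRnd]
    have hsplit : (pvNb adjacency_dict y).countP (fun v => PySem.Set.contains U v) =
        (pvNb adjacency_dict y).countP (fun v => PySem.Set.contains U' v) +
        (pvNb adjacency_dict y).countP (fun v => decide (v ∈ R)) := by
      induction pvNb adjacency_dict y with
      | nil => rfl
      | cons v l ihl =>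
        rw [List.countP_cons, List.countP_cons, List.countP_cons, ihl]
        by_cases hvR : v ∈ R
        · have hvU : v ∈ U := hRU v hvR
          have hvU' : v ∉ U' := fun h => ((hU' v).mp h).2 hvR
          simp only [hvR, decide_true]
          rw [if_pos ((PySem.Set.contains_iff _ _).mpr hvU),
            if_neg (by simp [hvU'])]
          simp
          omega
        · simp only [hvR, decide_false]
          by_cases hvU : v ∈ U
          · have hvU' : v ∈ U' := (hU' v).mpr ⟨hvU, hvR⟩
            rw [if_pos ((PySem.Set.contains_iff _ _).mpr hvU),
              if_pos ((PySem.Set.contains_iff _ _).mpr hvU')]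
            simp
            omega
          · have hvU' : v ∉ U' := fun h => hvU ((hU' v).mp h).1
            rw [if_neg (by simp [hvU]), if_neg (by simp [hvU'])]
            simp
    rw [hsplit]
    push_cast
    ring
  constructor
  · intro y hy
    rw [hflat (deg, bk), (hdecfold.1 y hy)]
    rw [hdeg y ((hU' y).mp hy).1,
      hcount R (fun x hx => hUU0 x (hRU x hx)) y (hUU0 y ((hU' y).mp hy).1),
      hdegsplit y hy]
    ring
  · intro y hy
    rw [hflat (deg, bk)]
    exact hdecfold.2 y hy

-- the two loops compute the same result under the invariant
theorem pv_loops_eq (adjacency_dict : List (Int × List Int)) (U0 : PySem.Set Int)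
    (rev : PySem.Dict Int (List Int)) (hrev : pvRevP adjacency_dict U0 rev)
    (hself : ∀ n ∈ U0, n ∉ pvNb adjacency_dict n) :
    ∀ (fuel : Nat) (U : PySem.Set Int) (deg : PySem.Dict Int Int)
      (bk : PySem.Dict Int (List Int)) (top : Int)
      (ci : PySem.Dict Int (List Int)) (an : PySem.Set Int),
      U.Nodup → (∀ n ∈ U, n ∈ U0) →
      (∀ n ∈ U, deg.getD n 0 = pvDeg adjacency_dict U n) →
      (∀ n ∈ U, n ∈ bk.getD (pvDeg adjacency_dict U n) []) →
      (∀ n ∈ U, pvDeg adjacency_dict U n ≤ top) →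
      pvLoopA adjacency_dict fuel U ci an = pvLoopB adjacency_dict rev fuel U deg bk top ci an := by
  intro fuel
  induction fuel with
  | zero => intro U deg bk top ci an _ _ _ _ _; rfl
  | succ fuel ih =>
    intro U deg bk top ci an hndU hUU0 hdeg hbk htop
    rw [pvLoopA, pvLoopB]
    by_cases hU : U = []
    · rw [if_pos hU, if_pos hU]
    · rw [if_neg hU, if_neg hU]
      obtain ⟨M, ℓ, hhead, hℓU, hM, hmax, hmin⟩ := pv_headA adjacency_dict U hU
      have hMtop : M ≤ top := by rw [hM]; exact htop ℓ hℓU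
      obtain ⟨bk1, hscan, hbk1⟩ := pv_scan adjacency_dict U deg M ℓ hdeg hℓU hM.symm hmax hmin
        ((top + 1).toNat) top bk hbk rfl hMtop
      simp only [hscan]
      rcases hsl : PySem.List.sorted2 (U.map fun n =>
          (((pvValidA adjacency_dict U n).length : Int), n, pvValidA adjacency_dict U n))
          (fun x => -x.1) (fun x => x.2.1) with _ | ⟨c, rest⟩
      · rw [hsl] at hhead
        exact absurd hhead (by simp)
      · rw [hsl] at hhead
        simp only [List.head?_cons, Option.some.injEq] at hhead
        subst hhead
        dsimp only
        by_cases hMz : M = 0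
        · rw [if_pos hMz, if_pos hMz]
        · rw [if_neg hMz, if_neg hMz]
          rw [pv_foldl_discard_eq_diff]
          -- shared abbreviations for this round
          set ms : List Int := PySem.List.sorted (pvValidA adjacency_dict U ℓ) (fun x => x)
            with hms
          set U' : PySem.Set Int := PySem.Set.diff (PySem.Set.discard U ℓ) ms with hU'
          have hmsV : ∀ y, y ∈ ms ↔ y ∈ pvValidA adjacency_dict U ℓ := by
            intro y
            rw [hms, PySem.List.mem_sorted]
          have hmsU : ∀ y ∈ ms, y ∈ U := by
            intro y hy
            exact ((PySem.Set.mem_inter _ _ _).mp ((hmsV y).mp hy)).2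
          have hℓms : ℓ ∉ ms := by
            intro hy
            exact hself ℓ (hUU0 ℓ hℓU) ((PySem.Set.mem_inter _ _ _).mp ((hmsV ℓ).mp hy)).1
          have hmsnd : ms.Nodup := by
            rw [hms]
            exact (PySem.List.sorted_perm _ _ _).nodup_iff.mpr
              (PySem.Set.nodup_inter _ _ (PySem.Set.nodup_ofList _))
          have hRnd : (ℓ :: ms).Nodup := List.nodup_cons.mpr ⟨hℓms, hmsnd⟩
          have hRU : ∀ x ∈ ℓ :: ms, x ∈ U := by
            intro x hx
            rcases List.mem_cons.mp hx with rfl | hx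
            · exact hℓU
            · exact hmsU x hx
          have hchar : ∀ y, y ∈ U' ↔ (y ∈ U ∧ y ∉ (ℓ :: ms)) := by
            intro y
            rw [hU', PySem.Set.mem_diff, PySem.Set.mem_discard]
            simp only [List.mem_cons]
            tauto
          have hndU' : U'.Nodup := PySem.Set.nodup_diff _ _ (PySem.Set.nodup_discard _ _ hndU)
          have hUU0' : ∀ n ∈ U', n ∈ U0 := fun n hn => hUU0 n ((hchar n).mp hn).1
          have hbk1' : ∀ y ∈ U', y ∈ bk1.getD (deg.getD y 0) [] := by
            intro y hy
            have hyU : y ∈ U := ((hchar y).mp hy).1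
            rw [hdeg y hyU]
            exact hbk1 y hyU
          obtain ⟨hdeg', hbk'⟩ := pv_decrement adjacency_dict U0 rev hrev U U' (ℓ :: ms)
            hRU hUU0 hRnd hchar deg bk1 hdeg hbk1'
          have hbk'' : ∀ n ∈ U', n ∈ ((ℓ :: ms).foldl
              (fun (p : PySem.Dict Int Int × PySem.Dict Int (List Int)) x =>
                ((rev.getD x []).foldl
                  (fun (q : PySem.Dict Int Int × PySem.Dict Int (List Int)) y =>
                    if PySem.Set.contains U' y then
                      (q.1.insert y (q.1.getD y 0 - 1),
                       q.2.insert (q.1.getD y 0 - 1) ((q.2.getD (q.1.getD y 0 - 1) []) ++ [y]))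
                    else q) p)) (deg, bk1)).2.getD (pvDeg adjacency_dict U' n) [] := by
            intro n hn
            rw [← hdeg' n hn]
            exact hbk' n hn
          have htop' : ∀ n ∈ U', pvDeg adjacency_dict U' n ≤ M := by
            intro n hn
            have hnU : n ∈ U := ((hchar n).mp hn).1
            refine le_trans ?_ (hmax n hnU)
            rw [pv_deg_eq_countP, pv_deg_eq_countP]
            have hmono : (pvNb adjacency_dict n).countP (fun v => PySem.Set.contains U' v) ≤
                (pvNb adjacency_dict n).countP (fun v => PySem.Set.contains U v) := by
              refine List.countP_mono_left ?_
              intro x _ hx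
              exact (PySem.Set.contains_iff _ _).mpr
                ((hchar x).mp ((PySem.Set.contains_iff _ _).mp hx)).1
            exact_mod_cast hmono
          exact ih U' _ _ M _ _ hndU' hUU0' hdeg' hbk'' htop' 

-- a nonempty bucket's index is a key of the bucket dict
theorem pv_key_mem (d : PySem.Dict Int (List Int)) (k : Int) (h : d.getD k [] ≠ []) :
    k ∈ d.keys := by
  by_contra hk
  rw [PySem.Dict.getD_of_not_contains] at h
  · exact h rfl
  · rw [← Bool.not_eq_true, PySem.Dict.contains_iff_mem_keys]
    exact hk

-- ===== VERDICT (by name: the statement is the Claim_ definition above) =====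
theorem find_star_clusters_greedy_spec : Claim_equal_find_star_clusters_greedy := by
  intro adjacency_dict all_heads_list _ hpre
  have hnd : (PySem.Set.ofList all_heads_list).Nodup := PySem.Set.nodup_ofList _
  have hself : ∀ n ∈ PySem.Set.ofList all_heads_list, n ∉ pvNb adjacency_dict n := by
    intro n hn hmem
    have hnh : n ∈ all_heads_list := (PySem.Set.mem_ofList _ _).mp hn
    have hmem' : n ∈ (PySem.Dict.mk adjacency_dict).getD n [] :=
      (PySem.Set.mem_ofList _ _).mp hmem
    cases hget : (PySem.Dict.mk adjacency_dict).get? n with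
    | none =>
      rw [PySem.Dict.getD_eq_get?_getD, hget] at hmem'
      exact absurd hmem' (List.not_mem_nil)
    | some v =>
      have hpair : (n, v) ∈ adjacency_dict := PySem.Dict.mem_items_of_get?_eq_some _ hget
      rw [PySem.Dict.getD_eq_get?_getD, hget] at hmem'
      exact hpre (n, v) hpair hnh hmem'
  obtain ⟨hdeg0, hrev0, hbk0⟩ := pv_setup adjacency_dict (PySem.Set.ofList all_heads_list) hnd
  have htop0 : ∀ n ∈ PySem.Set.ofList all_heads_list,
      pvDeg adjacency_dict (PySem.Set.ofList all_heads_list) n ≤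
      (match PySem.List.max?
          (pvSetupB adjacency_dict (PySem.Set.ofList all_heads_list)).2.2.keys (fun x => x) with
       | none => -1
       | some t => t) := by
    intro n hn
    have hkey : pvDeg adjacency_dict (PySem.Set.ofList all_heads_list) n ∈
        (pvSetupB adjacency_dict (PySem.Set.ofList all_heads_list)).2.2.keys := by
      refine pv_key_mem _ _ ?_
      intro h
      have hmem := hbk0 n hn
      rw [h] at hmem
      exact absurd hmem (List.not_mem_nil)
    cases hmax : PySem.List.max?
        (pvSetupB adjacency_dict (PySem.Set.ofList all_heads_list)).2.2.keys (fun x => x) with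
    | none =>
      rw [PySem.List.max?_eq_none_iff] at hmax
      rw [hmax] at hkey
      exact absurd hkey (List.not_mem_nil)
    | some t =>
      exact PySem.List.max?_isMax hmax _ hkey
  unfold Spec_find_star_clusters_greedy find_star_clusters_greedy find_star_clusters_greedy_alt
  simp only []
  rw [pv_loops_eq adjacency_dict (PySem.Set.ofList all_heads_list)
    (pvSetupB adjacency_dict (PySem.Set.ofList all_heads_list)).2.1 hrev0 hself
    (PySem.Set.ofList all_heads_list).length (PySem.Set.ofList all_heads_list)
    (pvSetupB adjacency_dict (PySem.Set.ofList all_heads_list)).1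
    (pvSetupB adjacency_dict (PySem.Set.ofList all_heads_list)).2.2
    (match PySem.List.max?
        (pvSetupB adjacency_dict (PySem.Set.ofList all_heads_list)).2.2.keys (fun x => x) with
     | none => -1
     | some t => t)
    PySem.Dict.empty PySem.Set.empty hnd (fun n hn => hn) hdeg0 hbk0 htop0]
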